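-- pv_equiv track=rewrite | github.com/Pancio-code/Fondamenti-informatica-I | esami/esame1/ProvaAlCalcolatore/Compito_A/Eserc3/A_Ex3_Sol.py | A_Ex3
-- ===== SOURCE A (Python) =====
-- def A_Ex3(l):
--     massimo=0
--     lista=[]
--     for e in l:
--         cont=0
--         for c in e:
--             if c.isupper():
--                 cont+=1
--         if cont>massimo:
--             massimo=cont
--             lista=[e]
--         elif cont==massimo:
--             lista.append(e)
--     i=0
--     while i<len(l):
--         if l[i] in lista:
--             l.remove(l[i])
--         else:
--             i = i+1
--     return l
-- ===== SOURCE B (Python) =====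
-- def A_Ex3(l):
--     M = max((sum(c.isupper() for c in e) for e in l), default=0)
--     l[:] = [e for e in l if sum(c.isupper() for c in e) < M]
--     return l
-- ===== Notes on version B (the rewrite author's own statement) =====
-- stated objective: faster
-- what changed: Replaces A's running-max plus winner-list bookkeeping and the in-place remove-while-scanning loop (with its repeated membership tests and list.remove scans) by computing the maximum uppercase count once and keeping, via one slice-assigned filter, exactly the elements with a strictly smaller count.
import Mathlib
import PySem

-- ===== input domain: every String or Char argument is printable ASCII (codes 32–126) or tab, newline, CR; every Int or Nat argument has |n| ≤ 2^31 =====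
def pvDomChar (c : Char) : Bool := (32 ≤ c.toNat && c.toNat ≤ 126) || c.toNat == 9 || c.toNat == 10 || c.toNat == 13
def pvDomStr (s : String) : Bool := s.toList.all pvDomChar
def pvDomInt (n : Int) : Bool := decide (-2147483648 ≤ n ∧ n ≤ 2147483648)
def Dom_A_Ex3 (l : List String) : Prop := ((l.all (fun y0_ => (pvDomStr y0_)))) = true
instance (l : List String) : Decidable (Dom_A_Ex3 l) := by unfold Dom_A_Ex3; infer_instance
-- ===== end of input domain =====

-- B replaces A's running-max/winner-list bookkeeping and the in-place remove-while-scanning loop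
-- by one max of the uppercase counts followed by a single filter (objective: faster — A's removal pass is quadratic, B is linear in the list length; measured faster in a timing run).
-- Both Pythons mutate l in place and return it; the equivalence proved here is about the return value.

-- ===== PORT A =====
-- hand port of A's `while i < len(l): if l[i] in lista: l.remove(l[i]) else: i += 1`
-- (`l.remove(x)` removes the first element equal to x = List.erase; `in` is value equality = ∈; exact)
def A_Ex3_removeLoop (lista : List String) (l : List String) (i : Nat) : List String :=
  if h : i < l.length then
    if l[i] ∈ lista then
      A_Ex3_removeLoop lista (l.erase l[i]) i
    else
      A_Ex3_removeLoop lista l (i + 1)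
  else l
termination_by l.length - i
decreasing_by
  · have hm : l[i] ∈ l := List.getElem_mem h
    have := List.length_erase_of_mem hm
    omega
  · omega

def A_Ex3_step (st : Nat × List String) (e : String) : Nat × List String :=
  let cont := e.toList.foldl (fun cont c => if PySem.Chars.isupper c then cont + 1 else cont) 0
  if cont > st.1 then (cont, [e])
  else if cont = st.1 then (st.1, st.2 ++ [e])
  else st

def A_Ex3 (l : List String) : List String :=
  let st := l.foldl A_Ex3_step (0, [])
  A_Ex3_removeLoop st.2 l 0

-- ===== PORT B =====
-- sum(c.isupper() for c in e)
def A_Ex3_ups (e : String) : Nat := e.toList.countP PySem.Chars.isupper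

def A_Ex3_alt (l : List String) : List String :=
  let M := PySem.List.maxD (l.map A_Ex3_ups) (fun x => x) 0
  l.filter (fun e => decide (A_Ex3_ups e < M))

-- ===== PRECONDITION & SPEC =====
def Spec_A_Ex3 (l : List String) (out : List String) : Prop := out = A_Ex3_alt l
instance (l : List String) (out : List String) : Decidable (Spec_A_Ex3 l out) := by unfold Spec_A_Ex3; infer_instance

-- ===== CLAIM (what is proved, stated in full; the proofs are below) =====
def Claim_equal_A_Ex3 : Prop := ∀ (l : List String), Dom_A_Ex3 l → Spec_A_Ex3 l (A_Ex3 l)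

-- ===== LEMMAS AND PROOFS =====

-- A's inner character loop computes the uppercase count
theorem A_Ex3_countLoop (cs : List Char) (n : Nat) :
    cs.foldl (fun cont c => if PySem.Chars.isupper c then cont + 1 else cont) n
      = n + cs.countP PySem.Chars.isupper := by
  induction cs generalizing n with
  | nil => simp
  | cons c cs ih =>
    simp only [List.foldl_cons, List.countP_cons, ih]
    by_cases h : PySem.Chars.isupper c <;> simp [h, Nat.add_assoc, Nat.add_comm 1]

-- running max of the counts, as A's fold maintains it
def A_Ex3_mx (l : List String) : Nat := (l.map A_Ex3_ups).foldl max 0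

theorem A_Ex3_foldA (l : List String) :
    l.foldl A_Ex3_step (0, []) =
      (A_Ex3_mx l, l.filter (fun e => A_Ex3_ups e == A_Ex3_mx l)) := by
  induction l using List.reverseRecOn with
  | nil => simp [A_Ex3_mx]
  | append_singleton l x ih =>
    have hmx : A_Ex3_mx (l ++ [x]) = max (A_Ex3_mx l) (A_Ex3_ups x) := by
      simp [A_Ex3_mx, List.foldl_append]
    have hub : ∀ e ∈ l, A_Ex3_ups e ≤ A_Ex3_mx l := by
      intro e he
      exact (PySem.List.le_foldl_max (l.map A_Ex3_ups) 0).2 _ (List.mem_map_of_mem he)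
    rw [List.foldl_append, ih]
    simp only [List.foldl_cons, List.foldl_nil, A_Ex3_step, A_Ex3_countLoop, Nat.zero_add]
    by_cases h1 : A_Ex3_ups x > A_Ex3_mx l
    · have hmx' : A_Ex3_mx (l ++ [x]) = A_Ex3_ups x := by omega
      have hfil : (l ++ [x]).filter (fun e => A_Ex3_ups e == A_Ex3_mx (l ++ [x])) = [x] := by
        rw [List.filter_append, List.filter_eq_nil_iff.2, List.nil_append]
        · simp [hmx']
        · intro e he
          have := hub e he
          simp only [beq_iff_eq, hmx']
          omega
      simp only [A_Ex3_ups] at h1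
      rw [if_pos h1, hfil, hmx']
      simp [A_Ex3_ups]
    · by_cases h2 : A_Ex3_ups x = A_Ex3_mx l
      · have hmx' : A_Ex3_mx (l ++ [x]) = A_Ex3_mx l := by omega
        have h1' : ¬ x.toList.countP PySem.Chars.isupper > A_Ex3_mx l := by
          simpa [A_Ex3_ups] using h1
        have h2' : x.toList.countP PySem.Chars.isupper = A_Ex3_mx l := by
          simpa [A_Ex3_ups] using h2
        rw [if_neg h1', if_pos h2']
        simp [List.filter_append, hmx', A_Ex3_ups, h2']
      · have hmx' : A_Ex3_mx (l ++ [x]) = A_Ex3_mx l := by omega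
        have h1' : ¬ x.toList.countP PySem.Chars.isupper > A_Ex3_mx l := by
          simpa [A_Ex3_ups] using h1
        have h2' : ¬ x.toList.countP PySem.Chars.isupper = A_Ex3_mx l := by
          simpa [A_Ex3_ups] using h2
        rw [if_neg h1', if_neg h2']
        simp [List.filter_append, hmx', h2]

theorem A_Ex3_remLoop (lista : List String) :
    ∀ (n : Nat) (l : List String) (i : Nat), l.length - i ≤ n →
      (∀ e ∈ l.take i, e ∉ lista) →
      A_Ex3_removeLoop lista l i = l.take i ++ (l.drop i).filter (fun e => decide (e ∉ lista)) := by
  intro n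
  induction n with
  | zero =>
    intro l i hn htake
    rw [A_Ex3_removeLoop]
    rw [dif_neg (by omega : ¬ i < l.length)]
    rw [List.take_of_length_le (by omega), List.drop_of_length_le (by omega)]
    simp
  | succ n ih =>
    intro l i hn htake
    rw [A_Ex3_removeLoop]
    by_cases h : i < l.length
    · rw [dif_pos h]
      have hdrop : l.drop i = l[i] :: l.drop (i + 1) := List.drop_eq_getElem_cons h
      have htki : (l.take i).length = i := List.length_take_of_le (by omega)
      obtain ⟨a, ha⟩ : ∃ a, l[i] = a := ⟨l[i], rfl⟩
      rw [ha] at hdrop ⊢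
      by_cases hmem : a ∈ lista
      · rw [if_pos hmem]
        have hni : a ∉ l.take i := fun hc => htake _ hc hmem
        have hsplit : l = l.take i ++ a :: l.drop (i + 1) := by
          conv_lhs => rw [← List.take_append_drop i l]
          rw [hdrop]
        have herase : l.erase a = l.take i ++ l.drop (i + 1) := by
          conv_lhs => rw [hsplit]
          rw [List.erase_append_right _ hni, List.erase_cons_head]
        rw [herase]
        have hlen' : (l.take i ++ l.drop (i + 1)).length - i ≤ n := by
          simp only [List.length_append, htki, List.length_drop]
          omega
        have h1 : (l.take i ++ l.drop (i + 1)).take i = l.take i := by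
          rw [List.take_append_of_le_length (by omega), List.take_take, Nat.min_self]
        have h2 : (l.take i ++ l.drop (i + 1)).drop i = l.drop (i + 1) := by
          rw [List.drop_append_of_le_length (by omega),
              List.drop_of_length_le (le_of_eq htki), List.nil_append]
        have htake' : ∀ e ∈ (l.take i ++ l.drop (i + 1)).take i, e ∉ lista := by
          rw [h1]; exact htake
        rw [ih _ _ hlen' htake', h1, h2, hdrop]
        simp [hmem]
      · rw [if_neg hmem]
        have hlen' : l.length - (i + 1) ≤ n := by omega
        have htake' : ∀ e ∈ l.take (i + 1), e ∉ lista := by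
          intro e he
          rw [List.take_add_one] at he
          rcases List.mem_append.1 he with h1 | h1
          · exact htake e h1
          · rw [List.getElem?_eq_getElem h, ha] at h1
            simp at h1
            subst h1; exact hmem
        rw [ih _ _ hlen' htake', List.take_add_one, List.getElem?_eq_getElem h, ha, hdrop]
        simp [hmem]
    · rw [dif_neg h]
      rw [List.take_of_length_le (by omega), List.drop_of_length_le (by omega)]
      simp

theorem A_Ex3_maxD_eq (l : List String) :
    PySem.List.maxD (l.map A_Ex3_ups) (fun x => x) 0 = A_Ex3_mx l := by
  cases l with
  | nil => simp [PySem.List.maxD, PySem.List.max?, A_Ex3_mx]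
  | cons x t =>
    simp only [A_Ex3_mx, List.map_cons, PySem.List.maxD, PySem.List.max?_id_cons,
      Option.getD_some, List.foldl_cons, Nat.zero_max]

-- ===== VERDICT (by name: the statement is the Claim_ definition above) =====
theorem A_Ex3_spec : Claim_equal_A_Ex3 := by
  intro l _
  unfold Spec_A_Ex3 A_Ex3 A_Ex3_alt
  rw [A_Ex3_foldA]
  rw [A_Ex3_remLoop _ l.length l 0 (by omega) (by simp)]
  simp only [List.take_zero, List.drop_zero, List.nil_append, A_Ex3_maxD_eq]
  apply List.filter_congr
  intro e he
  have hub : A_Ex3_ups e ≤ A_Ex3_mx l :=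
    (PySem.List.le_foldl_max (l.map A_Ex3_ups) 0).2 _ (List.mem_map_of_mem he)
  by_cases hlt : A_Ex3_ups e < A_Ex3_mx l
  · simp [hlt, List.mem_filter]
    omega
  · have heq : A_Ex3_ups e = A_Ex3_mx l := by omega
    simp [List.mem_filter, he, heq]
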